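-- pv_equiv track=rewrite | github.com/rezeditor/fingilish-to-farsi | fingilishbe farsi hay hay rezedditor.py | finglish_to_farsi_precise
-- ===== SOURCE A (Python) =====
-- def finglish_to_farsi_precise(text):
--     combos = {
--         'kh': 'خ',
--         'sh': 'ش',
--         'ch': 'چ',
--         'gh': 'غ',
--         'zh': 'ژ',
--         'ph': 'ف',
--         'th': 'ث',
--     }
--
--     singles = {
--         'a': 'ا',
--         'b': 'ب',
--         'c': 'ک',  # فقط اگه ترکیب نبود
--         'd': 'د',
--         'e': 'e',
--         'f': 'ف',
--         'g': 'گ',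
--         'h': 'ه',
--         'i': 'ی',
--         'j': 'ج',
--         'k': 'ک',
--         'l': 'ل',
--         'm': 'م',
--         'n': 'ن',
--         'o': 'و',
--         'p': 'پ',
--         'q': 'ق',
--         'r': 'ر',
--         's': 'س',
--         't': 'ت',
--         'u': 'و',
--         'v': 'و',
--         'w': 'و',
--         'x': 'کس',
--         'y': 'ی',
--         'z': 'ز',
--         ' ': ' ',
--         '?': '؟',
--     }
--
--     i = 0
--     result = ''
--     text = text.lower()
--
--     while i < len(text):
--         matched = False
--         # بررسی ترکیب‌ها اول
--         for combo in combos: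
--             if text[i:i+len(combo)] == combo:
--                 result += combos[combo]
--                 i += len(combo)
--                 matched = True
--                 break
--         if matched:
--             continue
--         # بررسی تک‌حرفی‌ها
--         char = text[i]
--         result += singles.get(char, char)
--         i += 1
--
--     return result
-- ===== SOURCE B (Python) =====
-- def finglish_to_farsi_precise(text):
--     # One streaming pass: every combo is <letter>+'h', so keep at most one
--     # pending letter and decide when the next character arrives.
--     combo_out = {'k': 'خ', 's': 'ش', 'c': 'چ', 'g': 'غ', 'z': 'ژ', 'p': 'ف', 't': 'ث'}
--     singles = {
--         'a': 'ا', 'b': 'ب', 'c': 'ک', 'd': 'د', 'e': 'e', 'f': 'ف', 'g': 'گ',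
--         'h': 'ه', 'i': 'ی', 'j': 'ج', 'k': 'ک', 'l': 'ل', 'm': 'م', 'n': 'ن',
--         'o': 'و', 'p': 'پ', 'q': 'ق', 'r': 'ر', 's': 'س', 't': 'ت', 'u': 'و',
--         'v': 'و', 'w': 'و', 'x': 'کس', 'y': 'ی', 'z': 'ز', ' ': ' ', '?': '؟',
--     }
--     out = []
--     pending = None  # a combo-starting letter awaiting a possible 'h'
--     for ch in text.lower():
--         if pending is not None:
--             if ch == 'h':
--                 out.append(combo_out[pending])
--                 pending = None
--                 continue
--             out.append(singles.get(pending, pending))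
--             pending = None
--         if ch in combo_out:
--             pending = ch
--         else:
--             out.append(singles.get(ch, ch))
--     if pending is not None:
--         out.append(singles.get(pending, pending))
--     return ''.join(out)
-- ===== Notes on version B (the rewrite author's own statement) =====
-- stated objective: faster
-- what changed: Replaces A's index loop that re-scans the 7-entry combo dict with string slicing at every position by a single streaming pass that exploits that every combo is <letter>+'h': it keeps at most one pending combo-starting letter and decides on the next character, collecting pieces in a list joined once at the end.
import Mathlib
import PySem

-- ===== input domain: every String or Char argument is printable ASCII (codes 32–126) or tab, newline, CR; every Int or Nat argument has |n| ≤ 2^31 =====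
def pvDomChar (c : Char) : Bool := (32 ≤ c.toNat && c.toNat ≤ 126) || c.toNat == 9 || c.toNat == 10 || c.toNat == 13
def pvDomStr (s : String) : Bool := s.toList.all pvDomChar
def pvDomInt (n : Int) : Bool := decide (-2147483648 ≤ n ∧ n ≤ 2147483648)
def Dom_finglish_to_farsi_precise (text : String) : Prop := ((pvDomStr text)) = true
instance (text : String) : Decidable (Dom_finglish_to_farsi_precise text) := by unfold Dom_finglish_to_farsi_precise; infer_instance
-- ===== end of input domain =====

-- B replaces A's index loop with inner combo scan by a single streaming pass that
-- holds at most one pending combo-starting letter (every combo is <letter>+'h').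

-- ===== PORT A =====
-- combos dict (2-char keys, iterated in insertion order)
def combosA : List (String × String) :=
  [("kh", "خ"), ("sh", "ش"), ("ch", "چ"), ("gh", "غ"), ("zh", "ژ"), ("ph", "ف"), ("th", "ث")]

-- singles dict; keys are 1-char Python strings, represented as Char
def singlesA : PySem.Dict Char String := PySem.Dict.mk
  [('a', "ا"), ('b', "ب"), ('c', "ک"), ('d', "د"), ('e', "e"), ('f', "ف"), ('g', "گ"),
   ('h', "ه"), ('i', "ی"), ('j', "ج"), ('k', "ک"), ('l', "ل"), ('m', "م"), ('n', "ن"),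
   ('o', "و"), ('p', "پ"), ('q', "ق"), ('r', "ر"), ('s', "س"), ('t', "ت"), ('u', "و"),
   ('v', "و"), ('w', "و"), ('x', "کس"), ('y', "ی"), ('z', "ز"), (' ', " "), ('?', "؟")]

-- the inner `for combo in combos: if text[i:i+len(combo)] == combo: break`;
-- cs is the suffix text[i:], so the slice text[i:i+len(combo)] is cs.take (len combo)
def findComboA (cs : List Char) : List (String × String) → Option (String × String)
  | [] => none
  | (k, v) :: rest => if cs.take k.toList.length = k.toList then some (k, v) else findComboA cs rest

theorem findComboA_mem {cs : List Char} {k v : String} :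
    ∀ l, findComboA cs l = some (k, v) → (k, v) ∈ l := by
  intro l
  induction l with
  | nil => intro h; simp [findComboA] at h
  | cons p rest ih =>
    obtain ⟨pk, pv⟩ := p
    intro h
    simp only [findComboA] at h
    split at h
    · simp_all
    · exact List.mem_cons_of_mem _ (ih h)

theorem combosA_len : ∀ p ∈ combosA, p.1.toList.length = 2 := by decide

theorem findComboA_len {cs : List Char} {k v : String}
    (h : findComboA cs combosA = some (k, v)) : k.toList.length = 2 :=
  combosA_len _ (findComboA_mem _ h)

-- the `while i < len(text)` loop with accumulator `result`
def loopA (cs : List Char) (acc : String) : String :=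
  match cs with
  | [] => acc
  | c :: rest =>
    match h : findComboA (c :: rest) combosA with
    | some (k, v) => loopA ((c :: rest).drop k.toList.length) (acc ++ v)
    | none => loopA rest (acc ++ singlesA.getD c (String.singleton c))
termination_by cs.length
decreasing_by
  · rw [findComboA_len h]; simp
  · simp

def finglish_to_farsi_precise (text : String) : String :=
  loopA (PySem.Str.lower text).toList ""

-- ===== PORT B =====
def combosB : PySem.Dict Char String := PySem.Dict.mk
  [('k', "خ"), ('s', "ش"), ('c', "چ"), ('g', "غ"), ('z', "ژ"), ('p', "ف"), ('t', "ث")]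

def singlesB : PySem.Dict Char String := PySem.Dict.mk
  [('a', "ا"), ('b', "ب"), ('c', "ک"), ('d', "د"), ('e', "e"), ('f', "ف"), ('g', "گ"),
   ('h', "ه"), ('i', "ی"), ('j', "ج"), ('k', "ک"), ('l', "ل"), ('m', "م"), ('n', "ن"),
   ('o', "و"), ('p', "پ"), ('q', "ق"), ('r', "ر"), ('s', "س"), ('t', "ت"), ('u', "و"),
   ('v', "و"), ('w', "و"), ('x', "کس"), ('y', "ی"), ('z', "ز"), (' ', " "), ('?', "؟")]

-- tail of the loop body: `if ch in combo_out: pending = ch  else: out.append(...)`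
def handleB (out : List String) (ch : Char) : List String × Option Char :=
  if combosB.contains ch then (out, some ch)
  else (out ++ [singlesB.getD ch (String.singleton ch)], none)

-- one iteration of `for ch in text.lower()`; state = (out, pending)
-- combo_out[pending] is a plain dict index; pending is only ever set from combo_out's
-- keys, so the lookup never fails and getD's default "" is unreachable
def stepB (st : List String × Option Char) (ch : Char) : List String × Option Char :=
  match st with
  | (out, some p) =>
    if ch = 'h' then (out ++ [combosB.getD p ""], none)
    else handleB (out ++ [singlesB.getD p (String.singleton p)]) ch
  | (out, none) => handleB out ch

def finglish_to_farsi_precise_alt (text : String) : String :=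
  let st := (PySem.Str.lower text).toList.foldl stepB ([], none)
  String.join (match st.2 with
    | some p => st.1 ++ [singlesB.getD p (String.singleton p)]
    | none => st.1)

-- ===== PRECONDITION & SPEC =====
def Spec_finglish_to_farsi_precise (text : String) (out : String) : Prop := out = finglish_to_farsi_precise_alt text
instance (text : String) (out : String) : Decidable (Spec_finglish_to_farsi_precise text out) := by unfold Spec_finglish_to_farsi_precise; infer_instance

-- ===== CLAIM (what is proved, stated in full; the proofs are below) =====
def Claim_equal_finglish_to_farsi_precise : Prop := ∀ (text : String), Dom_finglish_to_farsi_precise text → Spec_finglish_to_farsi_precise text (finglish_to_farsi_precise text)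

-- ===== LEMMAS AND PROOFS =====

-- B's final flush + join, as a function of the fold's end state
def finishB (st : List String × Option Char) : String :=
  String.join (match st.2 with
    | some p => st.1 ++ [singlesB.getD p (String.singleton p)]
    | none => st.1)

theorem alt_eq_finishB (text : String) :
    finglish_to_farsi_precise_alt text = finishB ((PySem.Str.lower text).toList.foldl stepB ([], none)) := rfl

theorem join_append_single (out : List String) (s : String) :
    String.join (out ++ [s]) = String.join out ++ s := by
  simp [String.join, List.foldl_append]

theorem singlesB_eq : singlesB = singlesA := rfl

theorem tl_kh : ("kh" : String).toList = ['k','h'] := rfl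
theorem tl_sh : ("sh" : String).toList = ['s','h'] := rfl
theorem tl_ch : ("ch" : String).toList = ['c','h'] := rfl
theorem tl_gh : ("gh" : String).toList = ['g','h'] := rfl
theorem tl_zh : ("zh" : String).toList = ['z','h'] := rfl
theorem tl_ph : ("ph" : String).toList = ['p','h'] := rfl
theorem tl_th : ("th" : String).toList = ['t','h'] := rfl

theorem starter_iff (c : Char) : combosB.contains c = true ↔
    ('k' = c ∨ 's' = c ∨ 'c' = c ∨ 'g' = c ∨ 'z' = c ∨ 'p' = c ∨ 't' = c) := by
  simp [combosB, PySem.Dict.contains_mk]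

theorem loopA_nil (acc : String) : loopA [] acc = acc := by rw [loopA]

theorem loopA_cons_none {c : Char} {rest : List Char}
    (h : findComboA (c :: rest) combosA = none) (acc : String) :
    loopA (c :: rest) acc = loopA rest (acc ++ singlesA.getD c (String.singleton c)) := by
  rw [loopA]; split <;> simp_all

theorem loopA_cons_some {c : Char} {rest : List Char} {k v : String}
    (h : findComboA (c :: rest) combosA = some (k, v)) (acc : String) :
    loopA (c :: rest) acc = loopA ((c :: rest).drop k.toList.length) (acc ++ v) := by
  rw [loopA]; split <;> simp_all

theorem findComboA_none_of_not_starter {c : Char} (rest : List Char)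
    (h : ¬ ('k' = c ∨ 's' = c ∨ 'c' = c ∨ 'g' = c ∨ 'z' = c ∨ 'p' = c ∨ 't' = c)) :
    findComboA (c :: rest) combosA = none := by
  simp only [not_or] at h
  obtain ⟨h1, h2, h3, h4, h5, h6, h7⟩ := h
  simp [findComboA, combosA, tl_kh, tl_sh, tl_ch, tl_gh, tl_zh, tl_ph, tl_th,
        Ne.symm h1, Ne.symm h2, Ne.symm h3, Ne.symm h4, Ne.symm h5, Ne.symm h6, Ne.symm h7]

theorem findComboA_none_of_not_h (c : Char) {d : Char} (rest : List Char) (hd : d ≠ 'h') :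
    findComboA (c :: d :: rest) combosA = none := by
  simp [findComboA, combosA, tl_kh, tl_sh, tl_ch, tl_gh, tl_zh, tl_ph, tl_th, hd]

theorem mainL : ∀ (n : Nat) (cs : List Char), cs.length ≤ n → ∀ (out : List String),
    loopA cs (String.join out) = finishB (cs.foldl stepB (out, none)) := by
  intro n
  induction n with
  | zero =>
    intro cs hcs out
    cases cs with
    | nil => simp [loopA_nil, finishB]
    | cons c rest => simp at hcs
  | succ n ih =>
    intro cs hcs out
    cases cs with
    | nil => simp [loopA_nil, finishB]
    | cons c rest =>
      simp only [List.foldl_cons]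
      by_cases hc : combosB.contains c = true
      · have hc0 := hc
        rw [starter_iff] at hc
        cases rest with
        | nil =>
          have hnone : findComboA [c] combosA = none := by
            rcases hc with h | h | h | h | h | h | h <;> subst h <;> decide
          rw [loopA_cons_none hnone, loopA_nil]
          simp [stepB, handleB, hc0, finishB, join_append_single, singlesB_eq]
        | cons d rest2 =>
          by_cases hd : d = 'h'
          · subst hd
            rcases hc with h | h | h | h | h | h | h <;> subst h
            · have hck : combosB.contains 'k' = true := by decide
              have hgd : combosB.getD 'k' "" = "خ" := by decide
              have hlen : rest2.length ≤ n := by simp at hcs; omega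
              have hsome : findComboA ('k' :: 'h' :: rest2) combosA = some ("kh", "خ") := by
                simp [findComboA, combosA, tl_kh]
              have hih := ih rest2 hlen (out ++ ["خ"])
              rw [loopA_cons_some hsome]
              simpa [tl_kh, stepB, handleB, hck, hgd, join_append_single] using hih
            · have hck : combosB.contains 's' = true := by decide
              have hgd : combosB.getD 's' "" = "ش" := by decide
              have hlen : rest2.length ≤ n := by simp at hcs; omega
              have hsome : findComboA ('s' :: 'h' :: rest2) combosA = some ("sh", "ش") := by
                simp [findComboA, combosA, tl_kh, tl_sh]
              have hih := ih rest2 hlen (out ++ ["ش"])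
              rw [loopA_cons_some hsome]
              simpa [tl_sh, stepB, handleB, hck, hgd, join_append_single] using hih
            · have hck : combosB.contains 'c' = true := by decide
              have hgd : combosB.getD 'c' "" = "چ" := by decide
              have hlen : rest2.length ≤ n := by simp at hcs; omega
              have hsome : findComboA ('c' :: 'h' :: rest2) combosA = some ("ch", "چ") := by
                simp [findComboA, combosA, tl_kh, tl_sh, tl_ch]
              have hih := ih rest2 hlen (out ++ ["چ"])
              rw [loopA_cons_some hsome]
              simpa [tl_ch, stepB, handleB, hck, hgd, join_append_single] using hih
            · have hck : combosB.contains 'g' = true := by decide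
              have hgd : combosB.getD 'g' "" = "غ" := by decide
              have hlen : rest2.length ≤ n := by simp at hcs; omega
              have hsome : findComboA ('g' :: 'h' :: rest2) combosA = some ("gh", "غ") := by
                simp [findComboA, combosA, tl_kh, tl_sh, tl_ch, tl_gh]
              have hih := ih rest2 hlen (out ++ ["غ"])
              rw [loopA_cons_some hsome]
              simpa [tl_gh, stepB, handleB, hck, hgd, join_append_single] using hih
            · have hck : combosB.contains 'z' = true := by decide
              have hgd : combosB.getD 'z' "" = "ژ" := by decide
              have hlen : rest2.length ≤ n := by simp at hcs; omega
              have hsome : findComboA ('z' :: 'h' :: rest2) combosA = some ("zh", "ژ") := by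
                simp [findComboA, combosA, tl_kh, tl_sh, tl_ch, tl_gh, tl_zh]
              have hih := ih rest2 hlen (out ++ ["ژ"])
              rw [loopA_cons_some hsome]
              simpa [tl_zh, stepB, handleB, hck, hgd, join_append_single] using hih
            · have hck : combosB.contains 'p' = true := by decide
              have hgd : combosB.getD 'p' "" = "ف" := by decide
              have hlen : rest2.length ≤ n := by simp at hcs; omega
              have hsome : findComboA ('p' :: 'h' :: rest2) combosA = some ("ph", "ف") := by
                simp [findComboA, combosA, tl_kh, tl_sh, tl_ch, tl_gh, tl_zh, tl_ph]
              have hih := ih rest2 hlen (out ++ ["ف"])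
              rw [loopA_cons_some hsome]
              simpa [tl_ph, stepB, handleB, hck, hgd, join_append_single] using hih
            · have hck : combosB.contains 't' = true := by decide
              have hgd : combosB.getD 't' "" = "ث" := by decide
              have hlen : rest2.length ≤ n := by simp at hcs; omega
              have hsome : findComboA ('t' :: 'h' :: rest2) combosA = some ("th", "ث") := by
                simp [findComboA, combosA, tl_kh, tl_sh, tl_ch, tl_gh, tl_zh, tl_ph, tl_th]
              have hih := ih rest2 hlen (out ++ ["ث"])
              rw [loopA_cons_some hsome]
              simpa [tl_th, stepB, handleB, hck, hgd, join_append_single] using hih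
          · have hnone := findComboA_none_of_not_h c rest2 hd
            have hstep1 : stepB (out, none) c = (out, some c) := by simp [stepB, handleB, hc0]
            have hstep2 : stepB (out, some c) d =
                stepB (out ++ [singlesB.getD c (String.singleton c)], none) d := by
              simp [stepB, hd]
            have hlen : (d :: rest2).length ≤ n := by simp at hcs; simp; omega
            have hih := ih (d :: rest2) hlen (out ++ [singlesB.getD c (String.singleton c)])
            simp only [List.foldl_cons] at hih
            rw [loopA_cons_none hnone]
            simpa [hstep1, hstep2, join_append_single, singlesB_eq] using hih
      · have hnone : findComboA (c :: rest) combosA = none :=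
          findComboA_none_of_not_starter rest (by rw [starter_iff] at hc; exact hc)
        have hlen : rest.length ≤ n := by simp at hcs; omega
        have hih := ih rest hlen (out ++ [singlesB.getD c (String.singleton c)])
        rw [loopA_cons_none hnone]
        simpa [stepB, handleB, hc, join_append_single, singlesB_eq] using hih
-- ===== VERDICT (by name: the statement is the Claim_ definition above) =====
theorem finglish_to_farsi_precise_spec : Claim_equal_finglish_to_farsi_precise := by
  intro text _
  unfold Spec_finglish_to_farsi_precise
  rw [alt_eq_finishB]
  have := mainL (PySem.Str.lower text).toList.length (PySem.Str.lower text).toList le_rfl []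
  simpa [finglish_to_farsi_precise, String.join] using this
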